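-- pv_equiv track=rewrite | github.com/UoA-CS715-Group12/CS715-Group-12-Procedural-Road-Generation | src/road_network/a_star.py | get_neighbors_masks
-- ===== SOURCE A (Python) =====
-- import math
--
-- MIN_TUNNEL_LEN = 5  #5 Tweak this
--
-- MIN_BRIDGE_LEN = 6  #6 Tweak this
--
-- MIN_HIGHWAY_LEN = 0
--
-- def get_neighbors_masks(n_range):
--     """
--     Get the neighbor pixels/vertices mask in a circle grid.
--
--     Return masks' orders:
--         1. Highway neighbors are the lowest equivalent vector.
--         2. Tunnel neighbors are at least MIN_TUNNEL_LEN away.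
--         3. Bridge neighbors are at least MIN_BRIDGE_LEN away.
--
--     :param n_range: Radius of the neighbor pixels/vertices from current cell
--     :return: An array of neighbor pixels/vertices within the circle grid.
--     """
--     neighbors_highway = set()
--     neighbors_tunnel = set()
--     neighbors_bridge = set()
--
--     for dx in range(-n_range, n_range + 1):
--         for dy in range(-n_range, n_range + 1):
--             # Skip the current cell itself
--             if dx == 0 and dy == 0:
--                 continue
--
--             # Neighbor is within the circle range
--             if dx ** 2 + dy ** 2 <= n_range ** 2:
--                 # Calculate the vector and get the lowest equivalent vector
--                 # Eg: (2, 4) and (4, 8), ignore (4, 8)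
--                 gcd = math.gcd(dx, dy)
--                 vector_lowest = (dx // gcd, dy // gcd)
--
--                 # Highway neighbor add the lowest vector
--                 if dx ** 2 + dy ** 2 >= MIN_HIGHWAY_LEN ** 2:
--                     neighbors_highway.add(vector_lowest)
--
--                 # Tunnel neighbor needs to be at least MIN_TUNNEL_LEN away
--                 if dx ** 2 + dy ** 2 >= MIN_TUNNEL_LEN ** 2:
--                     neighbors_tunnel.add((dx, dy))
--
--                 # Same as Bridge neighbor
--                 if dx ** 2 + dy ** 2 >= MIN_BRIDGE_LEN ** 2:
--                     neighbors_bridge.add((dx, dy))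
--
--     return neighbors_highway, neighbors_tunnel, neighbors_bridge
-- ===== SOURCE B (Python) =====
-- import math
--
-- MIN_TUNNEL_LEN = 5
-- MIN_BRIDGE_LEN = 6
-- MIN_HIGHWAY_LEN = 0
--
-- def _col_dys(n_range, min_len, dx):
--     # Closed-form dy bounds for column dx: the in-circle dys with dx^2+dy^2 >= min_len^2,
--     # as one or two ranges computed from integer square roots (no per-cell tests).
--     m = math.isqrt(n_range * n_range - dx * dx)
--     rem = min_len * min_len - dx * dx
--     if rem <= 0:
--         return list(range(-m, m + 1))
--     t = math.isqrt(rem - 1) + 1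
--     return list(range(-m, min(m, -t) + 1)) + list(range(max(-m, t), m + 1))
--
-- def _band(n_range, min_len):
--     # All cells of the ring min_len <= distance <= n_range, in row-major order.
--     out = []
--     for dx in range(-n_range, n_range + 1):
--         out.extend((dx, dy) for dy in _col_dys(n_range, min_len, dx))
--     return out
--
-- def get_neighbors_masks(n_range):
--     # Pass 1: highway = gcd-reduced vectors of the in-circle non-origin cells; the
--     # per-column bound m = isqrt(n^2 - dx^2) replaces A's per-cell circle test.
--     highway = set()
--     for dx in range(-n_range, n_range + 1):
--         m = math.isqrt(n_range * n_range - dx * dx)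
--         for dy in range(-m, m + 1):
--             if dx == 0 and dy == 0:
--                 continue
--             g = math.gcd(dx, dy)
--             highway.add((dx // g, dy // g))
--     # Passes 2 and 3: tunnel and bridge rings generated directly from column bounds.
--     return highway, set(_band(n_range, MIN_TUNNEL_LEN)), set(_band(n_range, MIN_BRIDGE_LEN))
-- ===== Notes on version B (the rewrite author's own statement) =====
-- stated objective: alternative
-- what changed: B replaces A's per-cell quadratic tests with per-column closed-form |dy| bounds from integer square roots: the circle-membership test disappears (the dy loop runs exactly over the in-circle range m = isqrt(n^2-dx^2)), and the tunnel/bridge rings are produced in separate passes that generate one or two dy ranges per column directly (t = isqrt(rem-1)+1), with no per-cell threshold test at all.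
import Mathlib
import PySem

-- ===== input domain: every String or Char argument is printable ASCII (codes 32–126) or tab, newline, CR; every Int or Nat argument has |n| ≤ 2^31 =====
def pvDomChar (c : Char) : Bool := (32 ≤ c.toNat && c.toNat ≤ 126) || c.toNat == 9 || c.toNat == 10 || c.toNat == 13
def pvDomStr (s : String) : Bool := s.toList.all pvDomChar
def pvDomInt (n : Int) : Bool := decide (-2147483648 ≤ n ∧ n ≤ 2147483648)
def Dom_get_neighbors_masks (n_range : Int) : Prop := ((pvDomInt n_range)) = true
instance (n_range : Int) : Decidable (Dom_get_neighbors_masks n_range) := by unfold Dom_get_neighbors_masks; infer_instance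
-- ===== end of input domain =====

-- B replaces A's per-cell quadratic tests by per-column closed-form |dy| bounds from integer
-- square roots: the circle test disappears (the dy loop runs over the exact in-circle range)
-- and the tunnel/bridge rings are generated in separate passes directly as one or two dy
-- ranges per column, with no per-cell threshold test; objective: alternative.

-- module constants (shared by both sources)
def pvMIN_TUNNEL_LEN : Int := 5
def pvMIN_BRIDGE_LEN : Int := 6
def pvMIN_HIGHWAY_LEN : Int := 0

-- ===== PORT A =====
def get_neighbors_masks (n_range : Int) :
    (List (Int × Int)) × (List (Int × Int)) × (List (Int × Int)) :=
  (PySem.List.pyRange (-n_range) (n_range + 1) 1).foldl (fun st dx =>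
    (PySem.List.pyRange (-n_range) (n_range + 1) 1).foldl (fun st dy =>
      if dx = 0 ∧ dy = 0 then st
      else if dx ^ 2 + dy ^ 2 ≤ n_range ^ 2 then
        let g : Int := Int.gcd dx dy
        let vector_lowest : Int × Int := (PySem.Int.floordiv dx g, PySem.Int.floordiv dy g)
        let nh := if dx ^ 2 + dy ^ 2 ≥ pvMIN_HIGHWAY_LEN ^ 2 then PySem.Set.add st.1 vector_lowest else st.1
        let nt := if dx ^ 2 + dy ^ 2 ≥ pvMIN_TUNNEL_LEN ^ 2 then PySem.Set.add st.2.1 (dx, dy) else st.2.1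
        let nb := if dx ^ 2 + dy ^ 2 ≥ pvMIN_BRIDGE_LEN ^ 2 then PySem.Set.add st.2.2 (dx, dy) else st.2.2
        (nh, nt, nb)
      else st) st)
    (PySem.Set.empty, PySem.Set.empty, PySem.Set.empty)

-- ===== PORT B =====
-- math.isqrt(k): exact for the nonnegative k this file reaches (Python raises on k < 0; B only
-- calls it with k ≥ 0, since |dx| ≤ n_range and rem - 1 ≥ 0 in the second branch)
def pvIsqrt (k : Int) : Int := Int.ofNat (Nat.sqrt k.toNat)

-- _col_dys(n_range, min_len, dx) of Source B
def pvDys (n_range : Int) (min_len : Int) (dx : Int) : List Int :=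
  let m := pvIsqrt (n_range * n_range - dx * dx)
  let rem := min_len * min_len - dx * dx
  if rem ≤ 0 then PySem.List.pyRange (-m) (m + 1) 1
  else
    let t := pvIsqrt (rem - 1) + 1
    PySem.List.pyRange (-m) (min m (-t) + 1) 1 ++ PySem.List.pyRange (max (-m) t) (m + 1) 1

-- _band(n_range, min_len) of Source B
def pvBand (n_range : Int) (min_len : Int) : List (Int × Int) :=
  (PySem.List.pyRange (-n_range) (n_range + 1) 1).foldl (fun out dx =>
    out ++ (pvDys n_range min_len dx).map (fun dy => (dx, dy))) []

def get_neighbors_masks_alt (n_range : Int) :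
    (List (Int × Int)) × (List (Int × Int)) × (List (Int × Int)) :=
  let highway : PySem.Set (Int × Int) :=
    (PySem.List.pyRange (-n_range) (n_range + 1) 1).foldl (fun hw dx =>
      let m := pvIsqrt (n_range * n_range - dx * dx)
      (PySem.List.pyRange (-m) (m + 1) 1).foldl (fun hw dy =>
        if dx = 0 ∧ dy = 0 then hw
        else
          let g : Int := Int.gcd dx dy
          PySem.Set.add hw (PySem.Int.floordiv dx g, PySem.Int.floordiv dy g)) hw)
      PySem.Set.empty
  (highway, PySem.Set.ofList (pvBand n_range pvMIN_TUNNEL_LEN),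
    PySem.Set.ofList (pvBand n_range pvMIN_BRIDGE_LEN))

-- ===== PRECONDITION & SPEC =====
def Spec_get_neighbors_masks (n_range : Int) (out : (List (Int × Int)) × (List (Int × Int)) × (List (Int × Int))) : Prop := out = get_neighbors_masks_alt n_range
instance (n_range : Int) (out : (List (Int × Int)) × (List (Int × Int)) × (List (Int × Int))) : Decidable (Spec_get_neighbors_masks n_range out) := by unfold Spec_get_neighbors_masks; infer_instance

-- ===== CLAIM (what is proved, stated in full; the proofs are below) =====
def Claim_equal_get_neighbors_masks : Prop := ∀ (n_range : Int), Dom_get_neighbors_masks n_range → Spec_get_neighbors_masks n_range (get_neighbors_masks n_range)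

-- ===== LEMMAS AND PROOFS =====

theorem pvIsqrt_eq (k : Int) : pvIsqrt k = ((Nat.sqrt k.toNat : Nat) : Int) := rfl

theorem pvIsqrt_nonneg (k : Int) : 0 ≤ pvIsqrt k := by
  rw [pvIsqrt_eq]; exact Int.natCast_nonneg _

-- x² ≤ K names the interval [-isqrt K, isqrt K]
theorem pv_sq_le_iff (K x : Int) (hK : 0 ≤ K) :
    (x * x ≤ K) ↔ (-(pvIsqrt K) ≤ x ∧ x ≤ pvIsqrt K) := by
  have habs : ((x.natAbs * x.natAbs : Nat) : Int) = x * x := Int.natAbs_mul_self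
  have hKt : ((K.toNat : Nat) : Int) = K := Int.toNat_of_nonneg hK
  rw [pvIsqrt_eq]
  constructor
  · intro h
    have h2 : x.natAbs * x.natAbs ≤ K.toNat := by omega
    have h3 : x.natAbs ≤ Nat.sqrt K.toNat := Nat.le_sqrt.mpr h2
    omega
  · intro ⟨h1, h2⟩
    have h3 : x.natAbs ≤ Nat.sqrt K.toNat := by omega
    have h4 : x.natAbs * x.natAbs ≤ Nat.sqrt K.toNat * Nat.sqrt K.toNat :=
      Nat.mul_le_mul h3 h3
    have h5 : Nat.sqrt K.toNat * Nat.sqrt K.toNat ≤ K.toNat := by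
      nlinarith [Nat.sqrt_le' K.toNat]
    omega

-- rem ≤ x² names the complement of an interval
theorem pv_sq_ge_iff (rem x : Int) (h : 1 ≤ rem) :
    (rem ≤ x * x) ↔ (x ≤ -(pvIsqrt (rem - 1) + 1) ∨ pvIsqrt (rem - 1) + 1 ≤ x) := by
  have := pv_sq_le_iff (rem - 1) x (by omega)
  omega

-- filtering an integer range by an interval yields a range
theorem pv_filter_range_interval (l u : Int) : ∀ (a b : Int),
    (PySem.List.pyRange a b).filter (fun x => decide (l ≤ x ∧ x ≤ u))
      = PySem.List.pyRange (max a l) (min b (u + 1)) := by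
  have main : ∀ (n : Nat) (a b : Int), (b - a).toNat = n →
      (PySem.List.pyRange a b).filter (fun x => decide (l ≤ x ∧ x ≤ u))
        = PySem.List.pyRange (max a l) (min b (u + 1)) := by
    intro n
    induction n with
    | zero =>
      intro a b h
      rw [PySem.List.pyRange_one_eq_nil (by omega), PySem.List.pyRange_one_eq_nil (by omega)]
      rfl
    | succ k ih =>
      intro a b h
      have hab : a < b := by omega
      rw [PySem.List.pyRange_one_cons hab]
      have ih' := ih (a + 1) b (by omega)
      by_cases h1 : l ≤ a ∧ a ≤ u
      · have hmax : max (a + 1) l = a + 1 := by omega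
        have hmax2 : max a l = a := by omega
        rw [hmax] at ih'
        have hlt : a < min b (u + 1) := by omega
        simp only [List.filter_cons, decide_eq_true_eq, if_pos h1, ih', hmax2]
        rw [PySem.List.pyRange_one_cons hlt]
      · by_cases h2 : l ≤ a
        · have hmax : max (a + 1) l = a + 1 := by omega
          have hmax2 : max a l = a := by omega
          rw [hmax] at ih'
          simp only [List.filter_cons, decide_eq_true_eq, if_neg h1, ih', hmax2]
          rw [PySem.List.pyRange_one_eq_nil (by omega), PySem.List.pyRange_one_eq_nil (by omega)]
        · have hmax : max (a + 1) l = max a l := by omega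
          rw [hmax] at ih'
          simp only [List.filter_cons, decide_eq_true_eq, if_neg h1, ih']
  intro a b; exact main (b - a).toNat a b rfl

-- filtering an integer range by the complement of an interval yields two ranges
theorem pv_filter_range_split (c d : Int) (hcd : c < d) : ∀ (a b : Int),
    (PySem.List.pyRange a b).filter (fun x => decide (x ≤ c ∨ d ≤ x))
      = PySem.List.pyRange a (min b (c + 1)) ++ PySem.List.pyRange (max a d) b := by
  have main : ∀ (n : Nat) (a b : Int), (b - a).toNat = n →
      (PySem.List.pyRange a b).filter (fun x => decide (x ≤ c ∨ d ≤ x))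
        = PySem.List.pyRange a (min b (c + 1)) ++ PySem.List.pyRange (max a d) b := by
    intro n
    induction n with
    | zero =>
      intro a b h
      rw [PySem.List.pyRange_one_eq_nil (by omega), PySem.List.pyRange_one_eq_nil (by omega),
        PySem.List.pyRange_one_eq_nil (by omega)]
      rfl
    | succ k ih =>
      intro a b h
      have hab : a < b := by omega
      rw [PySem.List.pyRange_one_cons hab]
      have ih' := ih (a + 1) b (by omega)
      by_cases h1 : a ≤ c
      · have hmaxe : max (a + 1) d = max a d := by omega
        rw [hmaxe] at ih'
        simp only [List.filter_cons, decide_eq_true_eq, if_pos (Or.inl h1), ih']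
        rw [PySem.List.pyRange_one_cons (show a < min b (c + 1) by omega)]
        rfl
      · by_cases h2 : d ≤ a
        · have hmaxe : max (a + 1) d = a + 1 := by omega
          have hmax2 : max a d = a := by omega
          rw [hmaxe] at ih'
          simp only [List.filter_cons, decide_eq_true_eq, if_pos (Or.inr h2), ih', hmax2]
          rw [PySem.List.pyRange_one_eq_nil (show min b (c + 1) ≤ a + 1 by omega),
            PySem.List.pyRange_one_eq_nil (show min b (c + 1) ≤ a by omega),
            PySem.List.pyRange_one_cons (show a < b by omega)]
          rfl
        · have h3 : ¬ (a ≤ c ∨ d ≤ a) := by omega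
          have hmaxe : max (a + 1) d = max a d := by omega
          rw [hmaxe] at ih'
          simp only [List.filter_cons, decide_eq_true_eq, if_neg h3, ih']
          rw [PySem.List.pyRange_one_eq_nil (show min b (c + 1) ≤ a + 1 by omega),
            PySem.List.pyRange_one_eq_nil (show min b (c + 1) ≤ a by omega)]
  intro a b; exact main (b - a).toNat a b rfl

-- splitting a fold over a triple into its three component folds
theorem pv_foldl_prod3 {α β γ δ : Type} (f1 : β → α → β) (f2 : γ → α → γ) (f3 : δ → α → δ)
    (l : List α) (h : β) (t : γ) (b : δ) :
    l.foldl (fun st c => (f1 st.1 c, f2 st.2.1 c, f3 st.2.2 c)) (h, t, b)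
      = (l.foldl f1 h, l.foldl f2 t, l.foldl f3 b) := by
  induction l generalizing h t b with
  | nil => rfl
  | cons x xs ih => simpa using ih (f1 h x) (f2 t x) (f3 b x)

-- the in-circle dys of column dx form the exact range [-m, m], m = isqrt(n² - dx²)
theorem pv_col_circle (n dx : Int) (hdx : -n ≤ dx ∧ dx < n + 1) :
    (PySem.List.pyRange (-n) (n + 1) 1).filter (fun dy => decide (dx * dx + dy * dy ≤ n * n))
      = PySem.List.pyRange (-(pvIsqrt (n * n - dx * dx))) (pvIsqrt (n * n - dx * dx) + 1) 1 := by
  have hn : 0 ≤ n := by omega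
  have hK : 0 ≤ n * n - dx * dx := by nlinarith
  have hm0 : 0 ≤ pvIsqrt (n * n - dx * dx) := pvIsqrt_nonneg _
  have hmm : pvIsqrt (n * n - dx * dx) * pvIsqrt (n * n - dx * dx) ≤ n * n - dx * dx :=
    (pv_sq_le_iff _ _ hK).mpr ⟨by omega, le_refl _⟩
  have hmn : pvIsqrt (n * n - dx * dx) ≤ n := by nlinarith
  have hpe : (fun dy : Int => decide (dx * dx + dy * dy ≤ n * n))
      = (fun dy : Int => decide (-(pvIsqrt (n * n - dx * dx)) ≤ dy ∧ dy ≤ pvIsqrt (n * n - dx * dx))) := by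
    funext dy
    have h := pv_sq_le_iff (n * n - dx * dx) dy hK
    simp only [decide_eq_decide]
    constructor
    · intro hh; exact h.mp (by linarith)
    · intro hh; have := h.mpr hh; linarith
  rw [hpe, pv_filter_range_interval]
  congr 1 <;> omega

-- the in-circle non-origin dys of column dx, thresholded at min_len, are exactly pvDys
theorem pv_col_dys (n dx s : Int) (hs : 1 ≤ s) (hdx : -n ≤ dx ∧ dx < n + 1) :
    ((PySem.List.pyRange (-n) (n + 1) 1).filter
        (fun dy => !(dx == 0 && dy == 0) && decide (dx * dx + dy * dy ≤ n * n))).filter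
      (fun dy => decide (s * s ≤ dx * dx + dy * dy)) = pvDys n s dx := by
  have hrw : ((PySem.List.pyRange (-n) (n + 1) 1).filter
        (fun dy => !(dx == 0 && dy == 0) && decide (dx * dx + dy * dy ≤ n * n))).filter
      (fun dy => decide (s * s ≤ dx * dx + dy * dy))
      = (PySem.List.pyRange (-n) (n + 1) 1).filter
        (fun dy => decide (s * s ≤ dx * dx + dy * dy)
          && (!(dx == 0 && dy == 0) && decide (dx * dx + dy * dy ≤ n * n))) :=
    List.filter_filter
  rw [hrw]
  unfold pvDys
  by_cases h0 : s * s - dx * dx ≤ 0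
  · rw [if_pos h0]
    have hdx0 : dx ≠ 0 := by intro h; rw [h] at h0; nlinarith
    have hpe : (fun dy : Int => decide (s * s ≤ dx * dx + dy * dy)
          && (!(dx == 0 && dy == 0) && decide (dx * dx + dy * dy ≤ n * n)))
        = (fun dy : Int => decide (dx * dx + dy * dy ≤ n * n)) := by
      funext dy
      have h1 : s * s ≤ dx * dx + dy * dy := by nlinarith
      have h2 : (dx == 0) = false := by simp [hdx0]
      simp [h1, h2]
    rw [hpe, pv_col_circle n dx hdx]
  · rw [if_neg h0]
    have hrem : 1 ≤ s * s - dx * dx := by omega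
    have ht1 : 1 ≤ pvIsqrt (s * s - dx * dx - 1) + 1 := by
      have := pvIsqrt_nonneg (s * s - dx * dx - 1); omega
    have hpe : (fun dy : Int => decide (s * s ≤ dx * dx + dy * dy)
          && (!(dx == 0 && dy == 0) && decide (dx * dx + dy * dy ≤ n * n)))
        = (fun dy : Int => decide (dy ≤ -(pvIsqrt (s * s - dx * dx - 1) + 1)
              ∨ pvIsqrt (s * s - dx * dx - 1) + 1 ≤ dy)
            && decide (dx * dx + dy * dy ≤ n * n)) := by
      funext dy
      by_cases horig : dx = 0 ∧ dy = 0
      · obtain ⟨hx, hy⟩ := horig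
        subst hx; subst hy
        have hf2 : ¬ ((0 : Int) ≤ -(pvIsqrt (s * s - 0 * 0 - 1) + 1)
            ∨ pvIsqrt (s * s - 0 * 0 - 1) + 1 ≤ (0 : Int)) := by
          have := pvIsqrt_nonneg (s * s - 0 * 0 - 1); omega
        have e1 : (!((0 : Int) == 0 && (0 : Int) == 0)) = false := rfl
        rw [e1]
        simp only [Bool.false_and, Bool.and_false, decide_eq_false hf2]
      · have horig' : (!(dx == 0 && dy == 0)) = true := by
          rcases not_and_or.mp horig with h | h <;> simp [h]
        rw [horig']
        simp only [Bool.true_and]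
        have hiff : (s * s ≤ dx * dx + dy * dy) ↔
            (dy ≤ -(pvIsqrt (s * s - dx * dx - 1) + 1) ∨ pvIsqrt (s * s - dx * dx - 1) + 1 ≤ dy) := by
          have base := pv_sq_ge_iff (s * s - dx * dx) dy hrem
          constructor
          · intro h; exact base.mp (by linarith)
          · intro h; have := base.mpr h; linarith
        congr 1
        simp only [decide_eq_decide]
        exact hiff
    rw [hpe]
    have hsplit : (PySem.List.pyRange (-n) (n + 1) 1).filter
        (fun dy : Int => decide (dy ≤ -(pvIsqrt (s * s - dx * dx - 1) + 1)
              ∨ pvIsqrt (s * s - dx * dx - 1) + 1 ≤ dy)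
            && decide (dx * dx + dy * dy ≤ n * n))
        = ((PySem.List.pyRange (-n) (n + 1) 1).filter
            (fun dy : Int => decide (dx * dx + dy * dy ≤ n * n))).filter
          (fun dy : Int => decide (dy ≤ -(pvIsqrt (s * s - dx * dx - 1) + 1)
              ∨ pvIsqrt (s * s - dx * dx - 1) + 1 ≤ dy)) := by
      rw [List.filter_filter]
    rw [hsplit, pv_col_circle n dx hdx,
      pv_filter_range_split (-(pvIsqrt (s * s - dx * dx - 1) + 1)) (pvIsqrt (s * s - dx * dx - 1) + 1)
        (by omega)]
    congr 1
    congr 1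
    omega

-- the tunnel/bridge component of A's loop equals ofList of B's band
theorem pv_band_component (n s : Int) (hs : 1 ≤ s) :
    ((PySem.List.pyRange (-n) (n + 1) 1).flatMap (fun dx =>
        ((PySem.List.pyRange (-n) (n + 1) 1).filter
          (fun dy => !(dx == 0 && dy == 0) && decide (dx * dx + dy * dy ≤ n * n))).map
          (fun dy => (dx, dy)))).foldl
      (fun t c => if c.1 ^ 2 + c.2 ^ 2 ≥ s ^ 2 then PySem.Set.add t c else t) PySem.Set.empty
      = PySem.Set.ofList (pvBand n s) := by
  rw [PySem.Set.ofList_eq_foldl]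
  unfold pvBand
  rw [PySem.List.foldl_append_eq_flatMap, List.nil_append, List.foldl_flatMap, List.foldl_flatMap]
  apply PySem.List.foldl_congr_mem
  intro t dx hmem
  have hdx : -n ≤ dx ∧ dx < n + 1 := by
    have := PySem.List.mem_pyRange_one.mp hmem; omega
  rw [List.foldl_map, List.foldl_map]
  have hb : (fun (t : PySem.Set (Int × Int)) (dy : Int) =>
        if (dx, dy).1 ^ 2 + (dx, dy).2 ^ 2 ≥ s ^ 2 then PySem.Set.add t (dx, dy) else t)
      = (fun (t : PySem.Set (Int × Int)) (dy : Int) =>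
        if (decide (s * s ≤ dx * dx + dy * dy)) = true then PySem.Set.add t (dx, dy) else t) := by
    funext t dy
    by_cases h : s * s ≤ dx * dx + dy * dy
    · simp [pow_two, h]
    · simp [pow_two, h]
  rw [hb, ← List.foldl_filter, pv_col_dys n dx s hs hdx]

theorem get_neighbors_masks_spec_aux (n_range : Int) :
    get_neighbors_masks n_range = get_neighbors_masks_alt n_range := by
  have halt : get_neighbors_masks_alt n_range =
      ((PySem.List.pyRange (-n_range) (n_range + 1) 1).foldl (fun hw dx =>
        (PySem.List.pyRange (-(pvIsqrt (n_range * n_range - dx * dx)))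
            (pvIsqrt (n_range * n_range - dx * dx) + 1) 1).foldl (fun hw dy =>
          if dx = 0 ∧ dy = 0 then hw
          else PySem.Set.add hw (PySem.Int.floordiv dx (Int.gcd dx dy),
            PySem.Int.floordiv dy (Int.gcd dx dy))) hw) PySem.Set.empty,
       PySem.Set.ofList (pvBand n_range pvMIN_TUNNEL_LEN),
       PySem.Set.ofList (pvBand n_range pvMIN_BRIDGE_LEN)) := rfl
  rw [halt]
  unfold get_neighbors_masks
  set R := PySem.List.pyRange (-n_range) (n_range + 1) 1 with hR
  set red : Int × Int → Int × Int := fun c =>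
    (PySem.Int.floordiv c.1 (Int.gcd c.1 c.2), PySem.Int.floordiv c.2 (Int.gcd c.1 c.2)) with hred
  set cells : List (Int × Int) := R.flatMap (fun dx =>
      ((R.filter (fun dy => !(dx == 0 && dy == 0) && decide (dx * dx + dy * dy ≤ n_range * n_range))).map
        (fun dy => (dx, dy)))) with hcells
  set step : (PySem.Set (Int × Int) × PySem.Set (Int × Int) × PySem.Set (Int × Int)) → (Int × Int) →
      (PySem.Set (Int × Int) × PySem.Set (Int × Int) × PySem.Set (Int × Int)) := fun st c =>
      ((if c.1 ^ 2 + c.2 ^ 2 ≥ pvMIN_HIGHWAY_LEN ^ 2 then PySem.Set.add st.1 (red c) else st.1),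
       (if c.1 ^ 2 + c.2 ^ 2 ≥ pvMIN_TUNNEL_LEN ^ 2 then PySem.Set.add st.2.1 c else st.2.1),
       (if c.1 ^ 2 + c.2 ^ 2 ≥ pvMIN_BRIDGE_LEN ^ 2 then PySem.Set.add st.2.2 c else st.2.2)) with hstep
  -- A's nested guarded loops = one fold of `step` over `cells`
  have hA : ∀ st : PySem.Set (Int × Int) × PySem.Set (Int × Int) × PySem.Set (Int × Int),
      R.foldl (fun st dx =>
        R.foldl (fun st dy =>
          if dx = 0 ∧ dy = 0 then st
          else if dx ^ 2 + dy ^ 2 ≤ n_range ^ 2 then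
            step st (dx, dy)
          else st) st) st
      = cells.foldl step st := by
    intro st
    rw [hcells, List.foldl_flatMap]
    apply PySem.List.foldl_congr_mem
    intro st' dx _
    rw [List.foldl_map, List.foldl_filter]
    apply PySem.List.foldl_congr_mem
    intro st'' dy _
    by_cases h0 : dx = 0 ∧ dy = 0
    · simp [h0]
    · by_cases hc : dx ^ 2 + dy ^ 2 ≤ n_range ^ 2
      · have hc' : dx * dx + dy * dy ≤ n_range * n_range := by
          simpa [pow_two] using hc
        simp [h0, hc, hc']
      · have hc' : ¬ dx * dx + dy * dy ≤ n_range * n_range := by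
          simpa [pow_two] using hc
        simp [h0, hc, hc']
  show (R.foldl _ (PySem.Set.empty, PySem.Set.empty, PySem.Set.empty)) = _
  have hA' := hA (PySem.Set.empty, PySem.Set.empty, PySem.Set.empty)
  have hbody : (fun st dx => R.foldl (fun st dy =>
        if dx = 0 ∧ dy = 0 then st
          else if dx ^ 2 + dy ^ 2 ≤ n_range ^ 2 then
            let g : Int := Int.gcd dx dy
            let vector_lowest : Int × Int := (PySem.Int.floordiv dx g, PySem.Int.floordiv dy g)
            let nh := if dx ^ 2 + dy ^ 2 ≥ pvMIN_HIGHWAY_LEN ^ 2 then PySem.Set.add st.1 vector_lowest else st.1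
            let nt := if dx ^ 2 + dy ^ 2 ≥ pvMIN_TUNNEL_LEN ^ 2 then PySem.Set.add st.2.1 (dx, dy) else st.2.1
            let nb := if dx ^ 2 + dy ^ 2 ≥ pvMIN_BRIDGE_LEN ^ 2 then PySem.Set.add st.2.2 (dx, dy) else st.2.2
            (nh, nt, nb)
          else st) st)
      = (fun st dx => R.foldl (fun st dy =>
          if dx = 0 ∧ dy = 0 then st
          else if dx ^ 2 + dy ^ 2 ≤ n_range ^ 2 then step st (dx, dy)
          else st) st) := by
    funext st dx
    apply PySem.List.foldl_congr_mem
    intro st' dy _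
    simp [hstep, hred]
  rw [hbody, hA']
  have hsplit := pv_foldl_prod3
    (fun h c => if c.1 ^ 2 + c.2 ^ 2 ≥ pvMIN_HIGHWAY_LEN ^ 2 then PySem.Set.add h (red c) else h)
    (fun t c => if c.1 ^ 2 + c.2 ^ 2 ≥ pvMIN_TUNNEL_LEN ^ 2 then PySem.Set.add t c else t)
    (fun b c => if c.1 ^ 2 + c.2 ^ 2 ≥ pvMIN_BRIDGE_LEN ^ 2 then PySem.Set.add b c else b)
    cells PySem.Set.empty PySem.Set.empty PySem.Set.empty
  rw [show step = (fun st c =>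
      ((fun h c => if c.1 ^ 2 + c.2 ^ 2 ≥ pvMIN_HIGHWAY_LEN ^ 2 then PySem.Set.add h (red c) else h) st.1 c,
       (fun t c => if c.1 ^ 2 + c.2 ^ 2 ≥ pvMIN_TUNNEL_LEN ^ 2 then PySem.Set.add t c else t) st.2.1 c,
       (fun b c => if c.1 ^ 2 + c.2 ^ 2 ≥ pvMIN_BRIDGE_LEN ^ 2 then PySem.Set.add b c else b) st.2.2 c)) from rfl,
    hsplit]
  refine Prod.ext ?_ (Prod.ext ?_ ?_)
  · -- highway component
    show cells.foldl _ PySem.Set.empty = _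
    rw [hcells, List.foldl_flatMap]
    apply PySem.List.foldl_congr_mem
    intro h dx hmem
    have hdx : -n_range ≤ dx ∧ dx < n_range + 1 := by
      have := PySem.List.mem_pyRange_one.mp (by rw [hR] at hmem; exact hmem); omega
    rw [List.foldl_map]
    have hg1 : (fun (h : PySem.Set (Int × Int)) (dy : Int) =>
          if (dx, dy).1 ^ 2 + (dx, dy).2 ^ 2 ≥ pvMIN_HIGHWAY_LEN ^ 2
          then PySem.Set.add h (red (dx, dy)) else h)
        = (fun (h : PySem.Set (Int × Int)) (dy : Int) => PySem.Set.add h (red (dx, dy))) := by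
      funext h dy
      have : (dx, dy).1 ^ 2 + (dx, dy).2 ^ 2 ≥ pvMIN_HIGHWAY_LEN ^ 2 := by
        simp only [pvMIN_HIGHWAY_LEN]; positivity
      rw [if_pos this]
    rw [hg1]
    have hg2 : (fun (hw : PySem.Set (Int × Int)) (dy : Int) =>
          if dx = 0 ∧ dy = 0 then hw
          else PySem.Set.add hw (PySem.Int.floordiv dx (Int.gcd dx dy),
            PySem.Int.floordiv dy (Int.gcd dx dy)))
        = (fun (hw : PySem.Set (Int × Int)) (dy : Int) =>
          if (!(dx == 0 && dy == 0)) = true then PySem.Set.add hw (red (dx, dy)) else hw) := by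
      funext hw dy
      by_cases h0 : dx = 0 ∧ dy = 0
      · rw [if_pos h0, if_neg (by simp [h0.1, h0.2])]
      · rw [if_neg h0, if_pos (show (!(dx == 0 && dy == 0)) = true by
          rcases not_and_or.mp h0 with h | h <;> simp [h])]
    rw [hg2, ← List.foldl_filter]
    have hcol : R.filter (fun dy => !(dx == 0 && dy == 0)
          && decide (dx * dx + dy * dy ≤ n_range * n_range))
        = (PySem.List.pyRange (-(pvIsqrt (n_range * n_range - dx * dx)))
            (pvIsqrt (n_range * n_range - dx * dx) + 1) 1).filter
          (fun dy => !(dx == 0 && dy == 0)) := by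
      rw [← pv_col_circle n_range dx hdx, List.filter_filter]
    rw [hR] at hcol ⊢
    rw [hcol]
  · -- tunnel component
    show cells.foldl _ PySem.Set.empty = _
    rw [hcells, hR]
    exact pv_band_component n_range pvMIN_TUNNEL_LEN (by decide)
  · -- bridge component
    show cells.foldl _ PySem.Set.empty = _
    rw [hcells, hR]
    exact pv_band_component n_range pvMIN_BRIDGE_LEN (by decide)

-- ===== VERDICT (by name: the statement is the Claim_ definition above) =====
theorem get_neighbors_masks_spec : Claim_equal_get_neighbors_masks := by
  intro n _
  unfold Spec_get_neighbors_masks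
  exact get_neighbors_masks_spec_aux n
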